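-- pv_equiv track=rewrite | github.com/ejfn/advent-of-code | 2021/25/day25.py | move_1d
-- ===== SOURCE A (Python) =====
-- def move_1d(arr, target='>'):
--     moved = False
--     cp = arr.copy()
--     for i, v in enumerate(cp):
--         next = i + 1 if i < len(cp) - 1 else 0
--         if v == target and cp[next] == '.':
--             arr[i] = '.'
--             arr[next] = v
--             moved = True
--     return moved
-- ===== SOURCE B (Python) =====
-- def move_1d(arr, target='>'):
--     n = len(arr)
--     cp = arr.copy()
--     new = []
--     for j in range(n):
--         c = cp[j]
--         prev = cp[j - 1] if j > 0 else cp[n - 1]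
--         nxt = cp[j + 1] if j < n - 1 else cp[0]
--         if c == '.' and prev == target:
--             new.append(target)
--         elif c == target and nxt == '.':
--             new.append('.')
--         else:
--             new.append(c)
--     moved = new != cp
--     arr[:] = new
--     return moved
-- ===== Notes on version B (the rewrite author's own statement) =====
-- stated objective: alternative
-- what changed: B builds the next state functionally with a per-cell neighborhood rule (arrival/departure) and derives moved as 'state changed', instead of A's in-place pair swaps with a moved flag set inside the scan.
-- intended difference: When target is '.' and the array has a cyclically adjacent pair of '.' cells, A returns True although the array is left unchanged (its swap of '.' into '.' moves nothing); B returns False, the intended 'did anything move' answer. — e.g. on move_1d(["."], "."): A returns true, B returns false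
import Mathlib
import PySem

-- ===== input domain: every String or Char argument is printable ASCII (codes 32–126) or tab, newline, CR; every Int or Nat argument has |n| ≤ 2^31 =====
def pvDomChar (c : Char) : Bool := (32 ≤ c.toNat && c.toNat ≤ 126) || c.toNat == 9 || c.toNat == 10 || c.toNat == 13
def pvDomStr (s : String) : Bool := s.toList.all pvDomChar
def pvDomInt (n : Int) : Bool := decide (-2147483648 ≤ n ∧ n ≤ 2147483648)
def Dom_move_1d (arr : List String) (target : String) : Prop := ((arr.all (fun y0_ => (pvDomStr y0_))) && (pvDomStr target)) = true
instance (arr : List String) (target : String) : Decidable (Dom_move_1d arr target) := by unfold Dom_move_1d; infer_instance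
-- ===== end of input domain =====

-- B builds the next state with a per-cell neighborhood rule and reports moved = (state changed),
-- instead of A's in-place pair swaps; equivalence is about the RETURN value (both also leave the
-- list in the same final state, but that is not claimed here).

-- ===== PORT A =====
-- literal port of A: fold over enumerate(cp) carrying (arr, moved); all indices are in range,
-- so pyGetD/pySetD are exact here
def move_1d (arr : List String) (target : String) : Bool :=
  let cp := arr
  (((PySem.List.enumerate cp 0).foldl
      (fun (st : List String × Bool) (iv : Int × String) =>
        let i := iv.1
        let v := iv.2
        let next : Int := if i < (cp.length : Int) - 1 then i + 1 else 0
        if v == target && PySem.List.pyGetD cp next "" == "." then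
          (PySem.List.pySetD (PySem.List.pySetD st.1 i ".") next v, true)
        else st)
      (arr, false))).2

-- ===== PORT B =====
-- literal port of Source B: build `new` cell by cell from cp's neighborhood, moved = (new != cp)
def move_1d_alt (arr : List String) (target : String) : Bool :=
  let n := arr.length
  let cp := arr
  let new := (List.range n).map (fun j =>
    let c := cp.getD j ""
    let prev := if 0 < j then cp.getD (j - 1) "" else cp.getD (n - 1) ""
    let nxt := if j < n - 1 then cp.getD (j + 1) "" else cp.getD 0 ""
    if c == "." && prev == target then target
    else if c == target && nxt == "." then "."
    else c)
  new != cp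

-- ===== PRECONDITION & SPEC =====
-- When target is "." and the array has a cyclically adjacent pair of "." cells, A returns true
-- although the array is left unchanged (swapping "." into "." moves nothing); B returns false,
-- the intended "did anything move" answer.
def D_move_1d (arr : List String) (target : String) : Prop :=
  target = "." ∧ ∃ i ∈ List.range arr.length,
    arr.getD i "" = "." ∧ arr.getD ((i + 1) % arr.length) "" = "."
instance (arr : List String) (target : String) : Decidable (D_move_1d arr target) := by
  unfold D_move_1d; infer_instance

def Spec_move_1d (arr : List String) (target : String) (out : Bool) : Prop :=
  ¬ D_move_1d arr target → out = move_1d_alt arr target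
instance (arr : List String) (target : String) (out : Bool) : Decidable (Spec_move_1d arr target out) := by
  unfold Spec_move_1d; infer_instance

def pvDiffWitness_move_1d : List String × String := (["."], ".")
def pvDiffWitnessOut_move_1d : Bool × Bool := (true, false)

-- ===== CLAIM (what is proved, stated in full; the proofs are below) =====
def Claim_unchanged_move_1d : Prop := ∀ (arr : List String) (target : String), Dom_move_1d arr target → Spec_move_1d arr target (move_1d arr target)
def Claim_changed_move_1d : Prop := Dom_move_1d (pvDiffWitness_move_1d.1) (pvDiffWitness_move_1d.2) ∧ D_move_1d (pvDiffWitness_move_1d.1) (pvDiffWitness_move_1d.2) ∧ move_1d (pvDiffWitness_move_1d.1) (pvDiffWitness_move_1d.2) = pvDiffWitnessOut_move_1d.1 ∧ move_1d_alt (pvDiffWitness_move_1d.1) (pvDiffWitness_move_1d.2) = pvDiffWitnessOut_move_1d.2 ∧ pvDiffWitnessOut_move_1d.1 ≠ pvDiffWitnessOut_move_1d.2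
def Claim_exact_move_1d : Prop := ∀ (arr : List String) (target : String), Dom_move_1d arr target → D_move_1d arr target → move_1d arr target ≠ move_1d_alt arr target

-- ===== LEMMAS AND PROOFS =====

-- successor index with wrap-around, as a Nat
def pvNxt (n k : Nat) : Nat := if k < n - 1 then k + 1 else 0

theorem pvNxt_lt {n k : Nat} (h : k < n) : pvNxt n k < n := by
  unfold pvNxt; split <;> omega

theorem pvNxt_eq_mod {n k : Nat} (h : k < n) : pvNxt n k = (k + 1) % n := by
  unfold pvNxt; split
  · rw [Nat.mod_eq_of_lt]; omega
  · have : k + 1 = n := by omega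
    simp [this]

-- the per-cell rule of port B
def pvG (cp : List String) (target : String) (j : Nat) : String :=
  let c := cp.getD j ""
  let prev := if 0 < j then cp.getD (j - 1) "" else cp.getD (cp.length - 1) ""
  let nxt := if j < cp.length - 1 then cp.getD (j + 1) "" else cp.getD 0 ""
  if c == "." && prev == target then target
  else if c == target && nxt == "." then "."
  else c

theorem move_1d_alt_eq (arr : List String) (target : String) :
    move_1d_alt arr target = ((List.range arr.length).map (pvG arr target) != arr) := rfl

-- A's fold: the Bool component is an `any`, independent of the list component
theorem pvFoldSnd (l : List (Int × String)) (p : Int × String → Bool)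
    (g : List String → Int × String → List String) (a : List String) (m : Bool) :
    ((l.foldl (fun (st : List String × Bool) iv =>
        if p iv then (g st.1 iv, true) else st) (a, m))).2 = (m || l.any p) := by
  induction l generalizing a m with
  | nil => simp
  | cons x xs ih =>
    simp only [List.foldl_cons, List.any_cons]
    by_cases hx : p x = true
    · simp [hx, ih]
    · simp only [Bool.not_eq_true] at hx
      simp [hx, ih]

-- characterization of A
theorem move_1d_iff (arr : List String) (target : String) :
    move_1d arr target = true ↔
      ∃ k, k < arr.length ∧ arr.getD k "" = target ∧ arr.getD (pvNxt arr.length k) "" = "." := by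
  unfold move_1d
  rw [pvFoldSnd (p := fun iv =>
        iv.2 == target && PySem.List.pyGetD arr (if iv.1 < (arr.length : Int) - 1 then iv.1 + 1 else 0) "" == ".")
      (g := fun a iv =>
        PySem.List.pySetD (PySem.List.pySetD a iv.1 ".")
          (if iv.1 < (arr.length : Int) - 1 then iv.1 + 1 else 0) iv.2)]
  simp only [Bool.false_or, List.any_eq_true]
  constructor
  · rintro ⟨iv, hmem, hp⟩
    rw [PySem.List.mem_enumerate_iff] at hmem
    obtain ⟨k, hk, rfl⟩ := hmem
    simp only [zero_add] at hp ⊢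
    refine ⟨k, hk, ?_, ?_⟩
    · have := (Bool.and_eq_true _ _).mp hp |>.1
      have h1 : arr.getD k "" = arr[k] := List.getD_eq_getElem _ _ hk
      rw [h1]; exact beq_iff_eq.mp this
    · have h2 := (Bool.and_eq_true _ _).mp hp |>.2
      by_cases hlt : (k : Int) < (arr.length : Int) - 1
      · have hk1 : k < arr.length - 1 := by omega
        rw [if_pos hlt] at h2
        have : ((k : Int) + 1) = ((k + 1 : Nat) : Int) := by push_cast; ring
        rw [this, PySem.List.pyGetD_natCast] at h2
        rw [pvNxt, if_pos hk1]
        exact beq_iff_eq.mp h2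
      · have hk1 : ¬ k < arr.length - 1 := by omega
        rw [if_neg hlt] at h2
        have : (0 : Int) = ((0 : Nat) : Int) := rfl
        rw [this, PySem.List.pyGetD_natCast] at h2
        rw [pvNxt, if_neg hk1]
        exact beq_iff_eq.mp h2
  · rintro ⟨k, hk, ht, hd⟩
    refine ⟨((k : Int), arr[k]), ?_, ?_⟩
    · rw [PySem.List.mem_enumerate_iff]
      exact ⟨k, hk, by simp⟩
    · simp only
      have h1 : arr[k] = arr.getD k "" := (List.getD_eq_getElem _ _ hk).symm
      rw [h1, ht]
      simp only [beq_self_eq_true, Bool.true_and]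
      by_cases hlt : (k : Int) < (arr.length : Int) - 1
      · have hk1 : k < arr.length - 1 := by omega
        rw [if_pos hlt]
        have : ((k : Int) + 1) = ((k + 1 : Nat) : Int) := by push_cast; ring
        rw [this, PySem.List.pyGetD_natCast]
        rw [pvNxt, if_pos hk1] at hd
        exact beq_iff_eq.mpr hd
      · have hk1 : ¬ k < arr.length - 1 := by omega
        rw [if_neg hlt]
        have : (0 : Int) = ((0 : Nat) : Int) := rfl
        rw [this, PySem.List.pyGetD_natCast]
        rw [pvNxt, if_neg hk1] at hd
        exact beq_iff_eq.mpr hd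

-- characterization of B
theorem move_1d_alt_iff (arr : List String) (target : String) :
    move_1d_alt arr target = true ↔
      ∃ j, j < arr.length ∧ pvG arr target j ≠ arr.getD j "" := by
  rw [move_1d_alt_eq]
  rw [bne_iff_ne]
  constructor
  · intro hne
    by_contra hall
    push Not at hall
    apply hne
    apply List.ext_getElem
    · simp
    · intro j h1 h2
      simp only [List.getElem_map, List.getElem_range]
      simp only [List.length_map, List.length_range] at h1
      have := hall j h1
      rw [List.getD_eq_getElem _ _ h1] at this
      exact this
  · rintro ⟨j, hj, hne⟩ heq
    apply hne
    have : ((List.range arr.length).map (pvG arr target)).getD j "" = arr.getD j "" := by rw [heq]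
    rwa [List.getD_eq_getElem _ _ (by simp [hj]), List.getElem_map, List.getElem_range] at this

-- B is false whenever target = "."
-- predecessor index with wrap-around
def pvPrv (n j : Nat) : Nat := if 0 < j then j - 1 else n - 1

theorem pvPrv_lt {n j : Nat} (h : j < n) : pvPrv n j < n := by
  unfold pvPrv; split <;> omega

theorem pvNxt_pvPrv {n j : Nat} (h : j < n) : pvNxt n (pvPrv n j) = j := by
  unfold pvNxt pvPrv; split <;> split <;> omega

theorem pvPrv_pvNxt {n k : Nat} (h : k < n) : pvPrv n (pvNxt n k) = k := by
  unfold pvNxt pvPrv; split <;> split <;> omega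

-- rewrite pvG's prev/next selectors through pvPrv/pvNxt
theorem pvG_eq (arr : List String) (target : String) (j : Nat) :
    pvG arr target j =
      (if arr.getD j "" == "." && arr.getD (pvPrv arr.length j) "" == target then target
       else if arr.getD j "" == target && arr.getD (pvNxt arr.length j) "" == "." then "."
       else arr.getD j "") := by
  unfold pvG pvPrv pvNxt
  by_cases h1 : 0 < j <;> by_cases h2 : j < arr.length - 1 <;> simp [h1, h2]

theorem pvG_dot (arr : List String) (j : Nat) : pvG arr "." j = arr.getD j "" := by
  rw [pvG_eq]
  split
  · next h => exact (beq_iff_eq.mp (Bool.and_eq_true _ _ |>.mp h).1).symm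
  · split
    · next h => exact (beq_iff_eq.mp (Bool.and_eq_true _ _ |>.mp h).1).symm
    · rfl

theorem move_1d_alt_dot (arr : List String) : move_1d_alt arr "." = false := by
  by_contra h
  rw [Bool.not_eq_false, move_1d_alt_iff] at h
  obtain ⟨j, hj, hne⟩ := h
  exact hne (pvG_dot arr j)

theorem main_equiv (arr : List String) (target : String) (hD : ¬ D_move_1d arr target) :
    move_1d arr target = move_1d_alt arr target := by
  by_cases ht : target = "."
  · subst ht
    rw [move_1d_alt_dot]
    by_contra h
    rw [Bool.not_eq_false, move_1d_iff] at h
    obtain ⟨k, hk, h1, h2⟩ := h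
    apply hD
    refine ⟨rfl, k, List.mem_range.mpr hk, h1, ?_⟩
    rwa [← pvNxt_eq_mod hk]
  · -- target ≠ ".": both sides are equivalent to the same existential
    have hiff : (move_1d arr target = true) ↔ (move_1d_alt arr target = true) := by
      rw [move_1d_iff, move_1d_alt_iff]
      constructor
      · rintro ⟨k, hk, hkt, hkd⟩
        refine ⟨pvNxt arr.length k, pvNxt_lt hk, ?_⟩
        rw [pvG_eq]
        have hcond : ((arr.getD (pvNxt arr.length k) "" == ".") &&
            (arr.getD (pvPrv arr.length (pvNxt arr.length k)) "" == target)) = true := by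
          rw [pvPrv_pvNxt hk, hkd, hkt]
          simp
        rw [if_pos hcond, hkd]
        intro hcontra
        exact ht hcontra
      · rintro ⟨j, hj, hne⟩
        rw [pvG_eq] at hne
        by_cases hb1 : ((arr.getD j "" == ".") && (arr.getD (pvPrv arr.length j) "" == target)) = true
        · -- arrival at j: witness is its predecessor
          obtain ⟨hc, hp⟩ := Bool.and_eq_true _ _ |>.mp hb1
          refine ⟨pvPrv arr.length j, pvPrv_lt hj, beq_iff_eq.mp hp, ?_⟩
          rw [pvNxt_pvPrv hj]
          exact beq_iff_eq.mp hc
        · simp only [Bool.not_eq_true] at hb1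
          rw [if_neg (ne_true_of_eq_false hb1)] at hne
          by_cases hb2 : ((arr.getD j "" == target) && (arr.getD (pvNxt arr.length j) "" == ".")) = true
          · obtain ⟨hc, hn⟩ := Bool.and_eq_true _ _ |>.mp hb2
            exact ⟨j, hj, beq_iff_eq.mp hc, beq_iff_eq.mp hn⟩
          · simp only [Bool.not_eq_true] at hb2
            rw [if_neg (ne_true_of_eq_false hb2)] at hne
            exact absurd rfl hne
    cases hA : move_1d arr target <;> cases hB : move_1d_alt arr target <;> simp_all

-- ===== VERDICT (by name: the statement is the Claim_ definition above) =====
theorem move_1d_spec : Claim_unchanged_move_1d := by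
  intro arr target _ hD
  exact main_equiv arr target hD

theorem move_1d_changed : Claim_changed_move_1d := by
  unfold Claim_changed_move_1d; decide

theorem move_1d_tight : Claim_exact_move_1d := by
  intro arr target _ hD
  obtain ⟨ht, i, hi, h1, h2⟩ := hD
  subst ht
  rw [move_1d_alt_dot]
  rw [Ne, Bool.eq_false_iff, Ne, Bool.not_eq_true, Bool.not_eq_false, move_1d_iff]
  have hi' := List.mem_range.mp hi
  exact ⟨i, hi', h1, by rwa [pvNxt_eq_mod hi']⟩
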